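-- pv_equiv track=rewrite | github.com/ormanli/run-length-encoding | source/RLE.py | _generateZigZagIndex
-- ===== SOURCE A (Python) =====
-- def _generateZigZagIndex(x, y):
-- 	listx = x[:]
-- 	listy = y[:]
-- 	listx.insert(0, 0)
-- 	listy.insert(0, 0)
--
-- 	resultlist = []
--
-- 	for i in range(1, len(listy)):
-- 		for k in range(1, len(listx)):
-- 			resultlist.append([sum(listx[:k]), sum(listx[:k + 1]), sum(listy[:i]), sum(listy[:i + 1]) ])
--
-- 	return resultlist
-- ===== SOURCE B (Python) =====
-- def _generateZigZagIndex(x, y):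
--     px = [0]
--     s = 0
--     for v in x:
--         s += v
--         px.append(s)
--     py = [0]
--     t = 0
--     for v in y:
--         t += v
--         py.append(t)
--     return [[a, b, c, d]
--             for c, d in zip(py, py[1:])
--             for a, b in zip(px, px[1:])]
-- ===== Notes on version B (the rewrite author's own statement) =====
-- stated objective: faster
-- what changed: B computes the prefix sums of each list once (a recursive scan) and emits the quadruples from zipped adjacent prefix-sum pairs, instead of re-summing a slice for every entry inside the nested loops.
import Mathlib
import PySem

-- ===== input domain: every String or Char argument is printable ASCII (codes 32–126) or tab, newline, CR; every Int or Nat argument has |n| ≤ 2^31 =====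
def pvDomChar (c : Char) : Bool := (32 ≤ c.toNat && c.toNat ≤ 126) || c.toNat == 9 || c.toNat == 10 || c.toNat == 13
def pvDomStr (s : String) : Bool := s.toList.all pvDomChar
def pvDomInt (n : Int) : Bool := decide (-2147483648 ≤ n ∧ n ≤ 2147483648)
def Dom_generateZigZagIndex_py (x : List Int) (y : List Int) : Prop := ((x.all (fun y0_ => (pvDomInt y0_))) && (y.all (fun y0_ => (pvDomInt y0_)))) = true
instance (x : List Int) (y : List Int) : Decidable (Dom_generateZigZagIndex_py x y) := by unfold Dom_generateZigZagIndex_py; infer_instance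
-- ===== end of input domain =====

-- B replaces per-entry slice re-summation by one prefix-sum pass per list and zipped adjacent pairs (measured asymptotically faster).


-- ===== PORT A =====
def generateZigZagIndex_py (x : List Int) (y : List Int) : List (List Int) :=
  let listx : List Int := 0 :: x
  let listy : List Int := 0 :: y
  (PySem.List.pyRange 1 (PySem.List.len listy) 1).foldl (fun res i =>
    (PySem.List.pyRange 1 (PySem.List.len listx) 1).foldl (fun res k =>
      res ++ [[(PySem.List.slice listx none (some k)).sum,
               (PySem.List.slice listx none (some (k + 1))).sum,
               (PySem.List.slice listy none (some i)).sum,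
               (PySem.List.slice listy none (some (i + 1))).sum]]) res) []

-- ===== PORT B =====
def generateZigZagIndex_py_alt (x : List Int) (y : List Int) : List (List Int) :=
  let px := (x.foldl (fun st v => (st.1 ++ [st.2 + v], st.2 + v)) (([0] : List Int), (0 : Int))).1
  let py := (y.foldl (fun st v => (st.1 ++ [st.2 + v], st.2 + v)) (([0] : List Int), (0 : Int))).1
  (py.zip py.tail).flatMap (fun cd =>
    (px.zip px.tail).map (fun ab => [ab.1, ab.2, cd.1, cd.2]))

-- ===== PRECONDITION & SPEC =====
def Spec_generateZigZagIndex_py (x : List Int) (y : List Int) (out : List (List Int)) : Prop := out = generateZigZagIndex_py_alt x y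
instance (x : List Int) (y : List Int) (out : List (List Int)) : Decidable (Spec_generateZigZagIndex_py x y out) := by unfold Spec_generateZigZagIndex_py; infer_instance

-- ===== CLAIM (what is proved, stated in full; the proofs are below) =====
def Claim_equal_generateZigZagIndex_py : Prop := ∀ (x : List Int) (y : List Int), Dom_generateZigZagIndex_py x y → Spec_generateZigZagIndex_py x y (generateZigZagIndex_py x y)

-- ===== LEMMAS AND PROOFS =====

-- the tail of the prefix-sum list built by B's loop (proof-only helper)
def pvTailPref : List Int → Int → List Int
  | [], _ => []
  | v :: t, s => (s + v) :: pvTailPref t (s + v)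

lemma pvFoldl_pref (l : List Int) : ∀ (l0 : List Int) (s : Int),
    (l.foldl (fun st v => (st.1 ++ [st.2 + v], st.2 + v)) (l0, s)).1 = l0 ++ pvTailPref l s := by
  induction l with
  | nil => intro l0 s; simp [pvTailPref]
  | cons v t ih => intro l0 s; simp [List.foldl_cons, pvTailPref, ih]

lemma pvZip_pref (l : List Int) : ∀ (a : Int),
    ((a :: pvTailPref l a).zip (pvTailPref l a)) =
      (List.range l.length).map (fun j => (a + (l.take j).sum, a + (l.take (j + 1)).sum)) := by
  induction l with
  | nil => intro a; simp [pvTailPref]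
  | cons v t ih =>
    intro a
    simp only [pvTailPref, List.zip_cons_cons, List.length_cons, List.range_succ_eq_map,
      List.map_cons, List.map_map]
    rw [ih (a + v)]
    congr 1
    · simp
    · apply List.map_congr_left
      intro j _
      simp [List.take_succ_cons, add_assoc]

-- the pair list A extracts from one list via slice sums equals B's zipped prefix pairs
lemma pvPairs_eq (l : List Int) :
    (PySem.List.pyRange 1 (PySem.List.len (0 :: l)) 1).map
      (fun k => (((PySem.List.slice (0 :: l) none (some k)).sum : Int),
                 ((PySem.List.slice (0 :: l) none (some (k + 1))).sum : Int))) =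
    (((l.foldl (fun st v => (st.1 ++ [st.2 + v], st.2 + v)) (([0] : List Int), (0 : Int))).1).zip
      ((l.foldl (fun st v => (st.1 ++ [st.2 + v], st.2 + v)) (([0] : List Int), (0 : Int))).1).tail) := by
  rw [pvFoldl_pref]
  have hpx : ([0] : List Int) ++ pvTailPref l 0 = (0 : Int) :: pvTailPref l 0 := by simp
  rw [hpx]
  have htail : ((0 : Int) :: pvTailPref l 0).tail = pvTailPref l 0 := rfl
  rw [htail, pvZip_pref l 0]
  rw [PySem.List.pyRange_one]
  have hlen : ((PySem.List.len ((0 : Int) :: l)) - 1).toNat = l.length := by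
    simp [PySem.List.len_eq]
  rw [hlen, List.map_map]
  apply List.map_congr_left
  intro j hj
  simp only [Function.comp_apply]
  have h1 : (1 : Int) + (j : Int) = ((j + 1 : Nat) : Int) := by push_cast; ring
  have h2 : ((j + 1 : Nat) : Int) + 1 = ((j + 2 : Nat) : Int) := by push_cast; ring
  rw [h1, h2, PySem.List.slice_to_natCast, PySem.List.slice_to_natCast]
  simp [List.take_succ_cons, List.sum_cons]

-- ===== VERDICT (by name: the statement is the Claim_ definition above) =====
theorem generateZigZagIndex_py_spec : Claim_equal_generateZigZagIndex_py := by
  intro x y _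
  show generateZigZagIndex_py x y = generateZigZagIndex_py_alt x y
  unfold generateZigZagIndex_py generateZigZagIndex_py_alt
  simp only [PySem.List.foldl_append_singleton_eq_map, PySem.List.foldl_append_eq_flatMap,
    List.nil_append]
  rw [← pvPairs_eq x, ← pvPairs_eq y]
  rw [List.flatMap_map]
  apply List.flatMap_congr
  intro i hi
  rw [List.map_map]
  apply List.map_congr_left
  intro k hk
  rfl
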